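-- pv_equiv track=rewrite | github.com/paochsanchez/University-SemesterVI-FinalProyect | main.py | prepareWords
-- ===== SOURCE A (Python) =====
-- def prepareWords(Words_List_WW):
--     wordList =[]
--     for list in Words_List_WW:
--         for item in list:
--             tuple = item.split("/")
--             if tuple[0] not in wordList:
--                 wordList.append(tuple[0])
--     wordList.sort()
--     return wordList
-- ===== SOURCE B (Python) =====
-- def prepareWords(Words_List_WW):
--     flat = []
--     for group in Words_List_WW:
--         for item in group:
--             flat.append(item.split("/")[0])
--     flat.sort()
--     result = []
--     for word in flat:
--         if not result or result[-1] != word: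
--             result.append(word)
--     return result
-- ===== Notes on version B (the rewrite author's own statement) =====
-- stated objective: faster
-- what changed: Replaces the quadratic 'not in wordList' membership scan before each append by collecting all first fields with duplicates, sorting once, and removing adjacent duplicates in one pass over the sorted list.
import Mathlib
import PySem

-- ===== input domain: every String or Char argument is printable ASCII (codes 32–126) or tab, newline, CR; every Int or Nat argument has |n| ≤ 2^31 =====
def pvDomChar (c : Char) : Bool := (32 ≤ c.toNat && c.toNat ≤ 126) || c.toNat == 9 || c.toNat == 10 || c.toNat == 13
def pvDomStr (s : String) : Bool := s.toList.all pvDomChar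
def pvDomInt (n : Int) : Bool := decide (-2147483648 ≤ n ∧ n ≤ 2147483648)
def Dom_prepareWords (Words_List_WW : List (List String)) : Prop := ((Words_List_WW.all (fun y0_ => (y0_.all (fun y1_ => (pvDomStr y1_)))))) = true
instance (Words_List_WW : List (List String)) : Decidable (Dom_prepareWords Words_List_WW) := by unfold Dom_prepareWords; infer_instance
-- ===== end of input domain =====

-- B collects every item.split("/")[0] with duplicates, sorts once, and removes adjacent
-- duplicates in one pass, instead of A's 'not in' membership scan before each append.

-- shared helper: item.split("/")[0]
def pvFirst (item : String) : String :=
  (PySem.List.pyGet? ((PySem.Str.split? item "/").getD []) 0).getD ""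

-- ===== PORT A =====
def prepareWords (Words_List_WW : List (List String)) : List String :=
  let wordList := Words_List_WW.foldl (fun wl l =>
    l.foldl (fun wl item =>
      let t0 := pvFirst item
      if t0 ∈ wl then wl else wl ++ [t0]) wl) []
  PySem.List.sorted wordList (fun x => x) false

-- ===== PORT B =====
def prepareWords_alt (Words_List_WW : List (List String)) : List String :=
  let flat := Words_List_WW.foldl (fun acc l =>
    l.foldl (fun acc item => acc ++ [pvFirst item]) acc) []
  let s := PySem.List.sorted flat (fun x => x) false
  s.foldl (fun res w => if res.getLast? = some w then res else res ++ [w]) []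

-- ===== PRECONDITION & SPEC =====
def Spec_prepareWords (Words_List_WW : List (List String)) (out : List String) : Prop := out = prepareWords_alt Words_List_WW
instance (Words_List_WW : List (List String)) (out : List String) : Decidable (Spec_prepareWords Words_List_WW out) := by unfold Spec_prepareWords; infer_instance

-- ===== CLAIM (what is proved, stated in full; the proofs are below) =====
def Claim_equal_prepareWords : Prop := ∀ (Words_List_WW : List (List String)), Dom_prepareWords Words_List_WW → Spec_prepareWords Words_List_WW (prepareWords Words_List_WW)

-- ===== LEMMAS AND PROOFS =====

-- the flat list of first fields, with duplicates
def pvFlat (ww : List (List String)) : List String := ww.flatMap (fun l => l.map pvFirst)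

-- A's collection loop builds exactly set-insertion over pvFlat (first occurrences in order)
lemma aLoop_eq_ofList (ww : List (List String)) :
    ww.foldl (fun wl l =>
      l.foldl (fun wl item =>
        let t0 := pvFirst item
        if t0 ∈ wl then wl else wl ++ [t0]) wl) []
    = PySem.Set.ofList (pvFlat ww) := by
  have hin : ∀ (l : List String) (wl : PySem.Set String),
      l.foldl (fun wl item =>
        let t0 := pvFirst item
        if t0 ∈ wl then wl else wl ++ [t0]) wl
      = PySem.Set.update wl (l.map pvFirst) := by
    intro l wl
    rw [PySem.Set.update_map_eq_foldl_add]
    apply PySem.List.foldl_congr_mem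
    intro acc x _
    simp [PySem.Set.add_eq_ite]
  have main : ∀ (ww : List (List String)) (s : PySem.Set String),
      ww.foldl (fun wl l =>
        l.foldl (fun wl item =>
          let t0 := pvFirst item
          if t0 ∈ wl then wl else wl ++ [t0]) wl) s
      = PySem.Set.update s (pvFlat ww) := by
    intro ww
    induction ww with
    | nil => intro s; simp [pvFlat, PySem.Set.update_nil]
    | cons l t ih =>
      intro s
      rw [List.foldl_cons, hin l s, ih, ← PySem.Set.update_append]
      simp [pvFlat]
  rw [main, PySem.Set.update_nil_left]

-- in a strictly increasing list, every member is < the last or equal to it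
lemma lt_or_eq_getLast {l : List String} {b a : String}
    (hp : l.Pairwise (· < ·)) (hb : l.getLast? = some b) (ha : a ∈ l) : a < b ∨ a = b := by
  induction l with
  | nil => cases ha
  | cons c t ih =>
    cases t with
    | nil =>
      simp at hb ha; subst hb; subst ha; right; rfl
    | cons d t' =>
      rw [List.getLast?_cons_cons] at hb
      rcases List.mem_cons.mp ha with rfl | ha'
      · left
        have hcd : ∀ y ∈ d :: t', a < y := (List.pairwise_cons.mp hp).1
        have hbmem : b ∈ d :: t' := List.mem_of_getLast? hb
        exact hcd b hbmem
      · exact ih (List.pairwise_cons.mp hp).2 hb ha'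

-- the adjacent-dedup fold: invariant over the sorted suffix
lemma adjFold (s : List String) :
    ∀ (acc : List String),
    s.Pairwise (· ≤ ·) →
    acc.Pairwise (· < ·) →
    (∀ a ∈ acc, ∀ x ∈ s, a ≤ x) →
    (s.foldl (fun res w => if res.getLast? = some w then res else res ++ [w]) acc).Pairwise (· < ·)
    ∧ ∀ y, (y ∈ s.foldl (fun res w => if res.getLast? = some w then res else res ++ [w]) acc ↔ y ∈ acc ∨ y ∈ s) := by
  induction s with
  | nil => intro acc _ hacc _; exact ⟨hacc, fun y => by simp⟩
  | cons x t ih =>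
    intro acc hs hacc hle
    have hs' : t.Pairwise (· ≤ ·) := (List.pairwise_cons.mp hs).2
    have hxt : ∀ z ∈ t, x ≤ z := (List.pairwise_cons.mp hs).1
    simp only [List.foldl_cons]
    by_cases hlast : acc.getLast? = some x
    · rw [if_pos hlast]
      have hxmem : x ∈ acc := List.mem_of_getLast? hlast
      obtain ⟨h1, h2⟩ := ih acc hs' hacc (by
        intro a ha z hz
        exact hle a ha z (List.mem_cons_of_mem _ hz))
      refine ⟨h1, fun y => ?_⟩
      rw [h2 y]
      constructor
      · rintro (h | h)
        · exact Or.inl h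
        · exact Or.inr (List.mem_cons_of_mem _ h)
      · rintro (h | h)
        · exact Or.inl h
        · rcases List.mem_cons.mp h with rfl | h'
          · exact Or.inl hxmem
          · exact Or.inr h'
    · rw [if_neg hlast]
      have haltx : ∀ a ∈ acc, a < x := by
        intro a ha
        cases hb : acc.getLast? with
        | none => simp [List.getLast?_eq_none_iff] at hb; subst hb; cases ha
        | some b =>
          have hbx : b ≤ x := hle b (List.mem_of_getLast? hb) x (List.mem_cons_self)
          have hbx' : b < x := lt_of_le_of_ne hbx (by rintro rfl; exact hlast hb)
          rcases lt_or_eq_getLast hacc hb ha with h | rfl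
          · exact lt_trans h hbx'
          · exact hbx'
      have hacc' : (acc ++ [x]).Pairwise (· < ·) := by
        rw [List.pairwise_append]
        exact ⟨hacc, List.pairwise_singleton _ _, by
          intro a ha b hb; rw [List.mem_singleton] at hb; subst hb; exact haltx a ha⟩
      obtain ⟨h1, h2⟩ := ih (acc ++ [x]) hs' hacc' (by
        intro a ha z hz
        rcases List.mem_append.mp ha with h | h
        · exact hle a h z (List.mem_cons_of_mem _ hz)
        · rw [List.mem_singleton] at h; subst h; exact hxt z hz)
      refine ⟨h1, fun y => ?_⟩
      rw [h2 y]
      simp only [List.mem_append, List.mem_cons]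
      tauto

-- ===== VERDICT (by name: the statement is the Claim_ definition above) =====
theorem prepareWords_spec : Claim_equal_prepareWords := by
  intro ww _
  unfold Spec_prepareWords prepareWords prepareWords_alt
  simp only []
  rw [aLoop_eq_ofList]
  -- B's flat-collection loop is pvFlat
  have hflat : ww.foldl (fun acc l =>
      l.foldl (fun acc item => acc ++ [pvFirst item]) acc) [] = pvFlat ww := by
    calc ww.foldl (fun acc l => l.foldl (fun acc item => acc ++ [pvFirst item]) acc) []
        = ww.foldl (fun (acc : List String) (l : List String) => acc ++ l.map pvFirst) [] :=
          PySem.List.foldl_congr_mem _ _ _ _ (fun acc l _ => PySem.List.foldl_append_singleton_eq_map _ _ _)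
      _ = [] ++ ww.flatMap (fun l => l.map pvFirst) := PySem.List.foldl_append_eq_flatMap _ ww []
      _ = pvFlat ww := by simp [pvFlat]
  rw [hflat]
  set s := PySem.List.sorted (pvFlat ww) (fun x => x) false with hsdef
  set r := s.foldl (fun res w => if res.getLast? = some w then res else res ++ [w]) [] with hrdef
  have hsp : s.Pairwise (· ≤ ·) := PySem.List.sorted_pairwise (pvFlat ww) (fun x => x)
  obtain ⟨hr1, hr2⟩ := adjFold s [] hsp (List.Pairwise.nil) (by intro a ha; cases ha)
  have hrnodup : r.Nodup := hr1.imp (fun h => ne_of_lt h)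
  have hrmem : ∀ y, y ∈ r ↔ y ∈ PySem.Set.ofList (pvFlat ww) := by
    intro y
    rw [hr2 y, PySem.Set.mem_ofList, hsdef, PySem.List.mem_sorted]
    simp
  have hperm : r.Perm (PySem.Set.ofList (pvFlat ww)) :=
    (List.perm_ext_iff_of_nodup hrnodup (PySem.Set.nodup_ofList _)).mpr hrmem
  have h := PySem.List.sorted_eq_of_perm_of_pairwise_lt (PySem.Set.ofList (pvFlat ww)) r (fun x : String => x) hperm hr1
  exact h
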